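-- pv_equiv track=rewrite | github.com/m-nabeel-anwar/AI-Data-Science-SMIT | Assignment_2.py | Count_Helping_Verbs
-- ===== SOURCE A (Python) =====
-- def Count_Helping_Verbs(text):
--     new_text=text.split(' ')
--     count=0
--     Helping_Verbs=["is","am","are","was","were","did","do","does","has","have","been","being","be"]
--     for value in new_text:
--         if value.lower() in Helping_Verbs:
--             count=count+1
--     return count
-- ===== SOURCE B (Python) =====
-- def Count_Helping_Verbs(text):
--     counts = {}
--     for w in text.split(' '):
--         lw = w.lower()
--         counts[lw] = counts.get(lw, 0) + 1
--     total = 0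
--     for v in ["is","am","are","was","were","did","do","does","has","have","been","being","be"]:
--         total += counts.get(v, 0)
--     return total
-- ===== Notes on version B (the rewrite author's own statement) =====
-- stated objective: alternative
-- what changed: B builds a frequency table of the lowercased words in one pass over the text, then sums the table entries over the fixed 13-verb list, instead of A's per-word membership test against the verb list.
import Mathlib
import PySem

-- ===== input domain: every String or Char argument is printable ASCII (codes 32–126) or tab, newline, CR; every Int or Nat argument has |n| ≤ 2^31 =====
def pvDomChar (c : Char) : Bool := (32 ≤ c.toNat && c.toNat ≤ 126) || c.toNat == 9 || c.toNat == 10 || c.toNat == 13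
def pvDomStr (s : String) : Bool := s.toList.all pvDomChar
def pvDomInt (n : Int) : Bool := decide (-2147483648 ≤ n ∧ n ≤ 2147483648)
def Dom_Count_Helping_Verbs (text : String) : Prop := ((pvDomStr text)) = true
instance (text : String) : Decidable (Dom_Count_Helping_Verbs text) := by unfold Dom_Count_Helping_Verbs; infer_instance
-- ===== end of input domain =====

-- B replaces A's per-word membership scan with a one-pass frequency table of the
-- lowercased words summed over the fixed 13-verb list (objective: alternative).

def pvHelpingVerbs : List String :=
  ["is","am","are","was","were","did","do","does","has","have","been","being","be"]

-- ===== PORT A =====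
-- text.split(' ') with the literal nonempty separator " " never raises: split? is always some here.
def Count_Helping_Verbs (text : String) : Int :=
  let new_text := (PySem.Str.split? text " ").getD []
  new_text.foldl (fun count value =>
    if PySem.Str.lower value ∈ pvHelpingVerbs then count + 1 else count) 0

-- ===== PORT B =====
def Count_Helping_Verbs_alt (text : String) : Int :=
  let counts : PySem.Dict String Int :=
    ((PySem.Str.split? text " ").getD []).foldl
      (fun d w => let lw := PySem.Str.lower w; d.insert lw (d.getD lw 0 + 1))
      PySem.Dict.empty
  pvHelpingVerbs.foldl (fun total v => total + counts.getD v 0) 0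

-- ===== PRECONDITION & SPEC =====
def Spec_Count_Helping_Verbs (text : String) (out : Int) : Prop := out = Count_Helping_Verbs_alt text
instance (text : String) (out : Int) : Decidable (Spec_Count_Helping_Verbs text out) := by unfold Spec_Count_Helping_Verbs; infer_instance

-- ===== CLAIM (what is proved, stated in full; the proofs are below) =====
def Claim_equal_Count_Helping_Verbs : Prop := ∀ (text : String), Dom_Count_Helping_Verbs text → Spec_Count_Helping_Verbs text (Count_Helping_Verbs text)

-- ===== LEMMAS AND PROOFS =====

-- a 0/1 indicator summed over a duplicate-free list is a membership test
lemma sum_ind {V : List String} (h : V.Nodup) (x : String) :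
    (V.map (fun v => if x = v then (1:Int) else 0)).sum = if x ∈ V then 1 else 0 := by
  induction V with
  | nil => simp
  | cons v V' ih =>
    simp only [List.map_cons, List.sum_cons, List.nodup_cons] at *
    by_cases hx : x = v
    · subst hx
      have : (V'.map (fun v => if x = v then (1:Int) else 0)).sum = 0 := by
        apply List.sum_eq_zero
        intro y hy
        simp only [List.mem_map] at hy
        obtain ⟨u, hu, rfl⟩ := hy
        have : x ≠ u := fun e => h.1 (e ▸ hu)
        simp [this]
      simp [this]
    · simp [hx, ih h.2]

-- summing per-verb counts over a duplicate-free verb list equals counting words that are verbs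
lemma key {V : List String} (h : V.Nodup) (L : List String) :
    (V.map (fun v => (L.count v : Int))).sum = (L.countP (fun x => decide (x ∈ V)) : Int) := by
  induction L with
  | nil => simp
  | cons x L ih =>
    have hc : ∀ v : String, ((x :: L).count v : Int)
        = (L.count v : Int) + if x = v then 1 else 0 := by
      intro v; rw [List.count_cons]; push_cast; simp [beq_iff_eq]
    simp only [hc]
    rw [List.sum_map_add, sum_ind h x, List.countP_cons, ih]
    push_cast
    by_cases hx : x ∈ V <;> simp [hx]

-- ===== VERDICT (by name: the statement is the Claim_ definition above) =====
theorem Count_Helping_Verbs_spec : Claim_equal_Count_Helping_Verbs := by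
  intro text _
  unfold Spec_Count_Helping_Verbs Count_Helping_Verbs Count_Helping_Verbs_alt
  set ws := (PySem.Str.split? text " ").getD [] with hws
  rw [PySem.List.foldl_ite_add_one (fun value => PySem.Str.lower value ∈ pvHelpingVerbs) ws 0]
  have hfold : ∀ (d : PySem.Dict String Int) (l : List String),
      l.foldl (fun d w => let lw := PySem.Str.lower w; d.insert lw (d.getD lw 0 + 1)) d
      = (l.map PySem.Str.lower).foldl (fun d x => d.insert x (d.getD x 0 + 1)) d := by
    intro d l; induction l generalizing d with
    | nil => rfl
    | cons a l ih => simp [List.foldl_cons, ih]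
  rw [hfold]
  rw [PySem.List.foldl_add pvHelpingVerbs
      (fun v => ((ws.map PySem.Str.lower).foldl (fun d x => d.insert x (d.getD x 0 + 1)) PySem.Dict.empty).getD v 0) 0]
  have hg : ∀ v, ((ws.map PySem.Str.lower).foldl (fun d x => d.insert x (d.getD x 0 + 1))
      (PySem.Dict.empty : PySem.Dict String Int)).getD v 0 = ((ws.map PySem.Str.lower).count v : Int) := by
    intro v
    rw [PySem.Dict.getD_foldl_insert_add_one]
    simp
  simp only [hg]
  have hnd : pvHelpingVerbs.Nodup := by decide
  rw [key hnd (ws.map PySem.Str.lower)]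
  rw [List.countP_map]
  rfl
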